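-- pv_equiv track=rewrite | github.com/sasanamari/busy_therapists | src/scraper.py | decode_email
-- ===== SOURCE A (Python) =====
-- def decode_email(encoded: str) -> str:
--     """
--     Decode encoded email address using shift-1 cipher with punctuation mapping
--
--     Args:
--         encoded: Encoded email string
--
--     Returns:
--         Decoded email address
--
--     Examples:
--         >>> decode_email("bmjdfAxpoefsmboe/fy")
--         'alice@wonderland.ex'
--     """
--     # Punctuation mappings (shift-1 cipher)
--     # Note: Based on ASCII shift-1 pattern (char + 1 to encode, char - 1 to decode)
--     punct_map = {
--         'A': '@',   # Confirmed via testing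
--         '/': '.',   # Confirmed via testing
--         '.': '-',   # Confirmed via testing (hyphen encodes to period)
--         '`': '_',   # Likely but unverified (underscore would encode to backtick)
--         ',': '+',   # Likely but unverified (plus would encode to comma)
--     }
--
--     decoded = []
--
--     for char in encoded:
--         # Check explicit punctuation mapping first
--         if char in punct_map:
--             decoded.append(punct_map[char])
--             continue
--
--         # Letters: shift back by 1
--         if char.isalpha():
--             base = ord('a') if char.islower() else ord('A')
--             decoded.append(chr((ord(char) - base - 1) % 26 + base))
--             continue
--
--         # Digits: shift back by 1 (with wraparound)
--         if char.isdigit():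
--             decoded.append(str((int(char) - 1) % 10))
--             continue
--
--         # Otherwise keep as-is (shouldn't happen if encoding is consistent)
--         decoded.append(char)
--
--     return ''.join(decoded)
-- ===== SOURCE B (Python) =====
-- def decode_email(encoded: str) -> str:
--     # Build one translation table (ord -> decoded char), punctuation overlaid last,
--     # then decode in a single translate() call.
--     table = {}
--     for base in (ord('a'), ord('A')):
--         for i in range(26):
--             table[base + i] = chr((i - 1) % 26 + base)
--     for i in range(10):
--         table[ord('0') + i] = chr((i - 1) % 10 + ord('0'))
--     table.update({ord('A'): '@', ord('/'): '.', ord('.'): '-',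
--                   ord('`'): '_', ord(','): '+'})
--     return encoded.translate(table)
-- ===== Notes on version B (the rewrite author's own statement) =====
-- stated objective: idiomatic
-- what changed: Replaces A's per-character branch cascade with a translation table (ord -> decoded char) built once from the same shift arithmetic with the punctuation map overlaid last, applied via a single str.translate call. (constant-factor speedup: the per-char work moves into C's translate loop)
import Mathlib
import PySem

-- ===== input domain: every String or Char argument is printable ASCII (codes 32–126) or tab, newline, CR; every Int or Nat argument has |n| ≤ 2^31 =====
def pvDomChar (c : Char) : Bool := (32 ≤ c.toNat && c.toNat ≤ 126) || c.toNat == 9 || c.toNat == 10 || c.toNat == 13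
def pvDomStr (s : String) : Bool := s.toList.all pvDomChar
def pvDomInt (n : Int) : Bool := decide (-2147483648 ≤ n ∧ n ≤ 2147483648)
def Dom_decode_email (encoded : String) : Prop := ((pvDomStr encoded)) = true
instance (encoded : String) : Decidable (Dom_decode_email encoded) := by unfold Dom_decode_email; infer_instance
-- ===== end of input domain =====

-- B builds one ord→char translation table (letters/digits by the shift arithmetic,
-- punctuation overlaid last) and decodes with a single translate pass — idiomatic.

-- ===== PORT A =====
-- punct_map literal of A
def punctMapA : PySem.Dict Char Char :=
  PySem.Dict.ofList [('A', '@'), ('/', '.'), ('.', '-'), ('`', '_'), (',', '+')]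

-- the chars appended by one iteration of A's loop (branch cascade in A's order)
def chunkA (c : Char) : List Char :=
  match punctMapA.get? c with
  | some d => [d]
  | none =>
    if PySem.Chars.isalpha c then
      let base : Int := if PySem.Chars.islower c then 97 else 65
      [Char.ofNat (PySem.Int.mod ((c.toNat : Int) - base - 1) 26 + base).toNat]
    else if PySem.Chars.isdigit c then
      (PySem.Int.toStr (PySem.Int.mod (((c.toNat : Int) - 48) - 1) 10)).toList
    else [c]

def decode_email (encoded : String) : String :=
  String.ofList (encoded.toList.foldl (fun acc c => acc ++ chunkA c) [])

-- ===== PORT B =====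
-- the translation table of Source B, built by the same three loops then the punctuation update
def tableB : PySem.Dict Int Char :=
  let t := ([(97 : Int), 65]).foldl (fun t base =>
    (PySem.List.pyRange 0 26 1).foldl (fun t i =>
      t.insert (base + i) (Char.ofNat (PySem.Int.mod (i - 1) 26 + base).toNat)) t)
    PySem.Dict.empty
  let t := (PySem.List.pyRange 0 10 1).foldl (fun t i =>
      t.insert (48 + i) (Char.ofNat (PySem.Int.mod (i - 1) 10 + 48).toNat)) t
  ((((t.insert 65 '@').insert 47 '.').insert 46 '-').insert 96 '_').insert 44 '+'

def decode_email_alt (encoded : String) : String :=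
  String.ofList (encoded.toList.map (fun c => (tableB.get? (c.toNat : Int)).getD c))

-- ===== PRECONDITION & SPEC =====
def Spec_decode_email (encoded : String) (out : String) : Prop := out = decode_email_alt encoded
instance (encoded : String) (out : String) : Decidable (Spec_decode_email encoded out) := by unfold Spec_decode_email; infer_instance

-- ===== CLAIM (what is proved, stated in full; the proofs are below) =====
def Claim_equal_decode_email : Prop := ∀ (encoded : String), Dom_decode_email encoded → Spec_decode_email encoded (decode_email encoded)

-- ===== LEMMAS AND PROOFS =====

-- per-character agreement on all domain characters (codes < 127), by evaluation
set_option maxRecDepth 4000 in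
theorem chunkA_eq_table : ∀ n ∈ List.range 127,
    chunkA (Char.ofNat n) = [((tableB.get? ((Char.ofNat n).toNat : Int)).getD (Char.ofNat n))] := by
  decide

theorem chunkA_eq_table' (c : Char) (h : pvDomChar c = true) :
    chunkA c = [((tableB.get? ((c.toNat : Int))).getD c)] := by
  have hn : c.toNat < 127 := by
    simp [pvDomChar] at h
    omega
  have := chunkA_eq_table c.toNat (List.mem_range.mpr hn)
  simpa [Char.ofNat_toNat] using this

theorem fold_eq_map (l : List Char) (h : ∀ c ∈ l, pvDomChar c = true) (acc : List Char) :
    l.foldl (fun acc c => acc ++ chunkA c) acc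
      = acc ++ l.map (fun c => (tableB.get? (c.toNat : Int)).getD c) := by
  induction l generalizing acc with
  | nil => simp
  | cons c l ih =>
    simp only [List.foldl_cons, List.map_cons]
    rw [ih (fun x hx => h x (List.mem_cons_of_mem _ hx)),
        chunkA_eq_table' c (h c (List.mem_cons_self ..))]
    simp

-- ===== VERDICT (by name: the statement is the Claim_ definition above) =====
theorem decode_email_spec : Claim_equal_decode_email := by
  intro encoded hdom
  unfold Spec_decode_email decode_email decode_email_alt
  have h : ∀ c ∈ encoded.toList, pvDomChar c = true := by
    simpa [pvDomStr, List.all_eq_true, Dom_decode_email] using hdom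
  rw [fold_eq_map _ h]
  simp
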